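-- pv_equiv track=rewrite | github.com/20215269-ducdvm/vrp-project | hsavrptw/constraint_checker.py | solution_to_routes
-- ===== SOURCE A (Python) =====
-- def solution_to_routes(solution, depot=0) -> list[list[int]]:
--     """
--     Convert a flat curr_solution list to a list of routes.
--
--     Args:
--         solution (list): List representing the curr_solution with zeros as route delimiters
--         depot (int, optional): The depot identifier. Defaults to 0.
--
--     Returns:
--         list: List of routes where each route starts and ends with the depot
--     """
--     routes = []
--     current_route = [depot]  # start with depot
--
--     for node in solution:
--         if node == depot:
--             # complete the current route by adding the depot
--             current_route.append(depot)
--             # add the completed route to routes if it contains nodes other than depot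
--             if len(current_route) > 2:  # More than just [depot, depot]
--                 routes.append(current_route)
--             # start a new route
--             current_route = [depot]
--         else:
--             # add node to current route
--             current_route.append(node)
--
--     # check if the last route is incomplete (doesn't end with depot)
--     if len(current_route) > 1:  # Has at least one node besides depot
--         current_route.append(depot)
--         routes.append(current_route)
--
--     return routes
-- ===== SOURCE B (Python) =====
-- from itertools import groupby
--
-- def solution_to_routes(solution, depot=0) -> list[list[int]]:
--     return [[depot] + list(g) + [depot]
--             for is_depot, g in groupby(solution, key=lambda x: x == depot)
--             if not is_depot]
-- ===== Notes on version B (the rewrite author's own statement) =====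
-- stated objective: idiomatic
-- what changed: Replaces the manual accumulator loop with flush logic by itertools.groupby runs: keep each maximal non-depot run and wrap it in depots via a comprehension.
import Mathlib
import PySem

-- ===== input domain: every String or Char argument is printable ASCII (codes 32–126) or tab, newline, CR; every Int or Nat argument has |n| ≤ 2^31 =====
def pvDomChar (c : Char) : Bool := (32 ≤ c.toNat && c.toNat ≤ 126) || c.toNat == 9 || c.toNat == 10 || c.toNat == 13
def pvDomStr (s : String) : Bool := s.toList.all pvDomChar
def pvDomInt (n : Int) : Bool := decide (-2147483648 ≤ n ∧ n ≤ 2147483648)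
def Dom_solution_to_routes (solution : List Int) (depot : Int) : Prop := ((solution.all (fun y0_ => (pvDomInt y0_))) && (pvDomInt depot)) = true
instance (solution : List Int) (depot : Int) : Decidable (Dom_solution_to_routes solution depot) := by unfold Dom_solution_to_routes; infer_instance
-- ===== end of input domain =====

-- B replaces A's accumulator loop with flush logic by grouping the flat list into
-- maximal non-depot runs (itertools.groupby / List.splitOnP) and wrapping each run
-- in depots; objective: idiomatic.

-- ===== PORT A =====
-- literal transliteration of A's loop: state = (routes, current_route);
-- strA_step is the loop body, strA_finish the post-loop incomplete-route check.
def strA_step (depot : Int) (st : List (List Int) × List Int) (node : Int) :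
    List (List Int) × List Int :=
  if node = depot then
    let cr := st.2 ++ [depot]
    if cr.length > 2 then (st.1 ++ [cr], [depot]) else (st.1, [depot])
  else
    (st.1, st.2 ++ [node])

def strA_finish (depot : Int) (st : List (List Int) × List Int) : List (List Int) :=
  if st.2.length > 1 then st.1 ++ [st.2 ++ [depot]] else st.1

def solution_to_routes (solution : List Int) (depot : Int) : List (List Int) :=
  strA_finish depot (solution.foldl (strA_step depot) ([], [depot]))

-- ===== PORT B =====
-- Source B's groupby over (x == depot): the non-depot groups are exactly the nonempty
-- pieces of splitOnP (· == depot); each is wrapped as [depot] + group + [depot].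
def solution_to_routes_alt (solution : List Int) (depot : Int) : List (List Int) :=
  (((solution.splitOnP (· == depot)).filter (· ≠ [])).map
    (fun g => depot :: g ++ [depot]))

-- ===== PRECONDITION & SPEC =====
def Spec_solution_to_routes (solution : List Int) (depot : Int) (out : List (List Int)) : Prop := out = solution_to_routes_alt solution depot
instance (solution : List Int) (depot : Int) (out : List (List Int)) : Decidable (Spec_solution_to_routes solution depot out) := by unfold Spec_solution_to_routes; infer_instance

-- ===== CLAIM (what is proved, stated in full; the proofs are below) =====
def Claim_equal_solution_to_routes : Prop := ∀ (solution : List Int) (depot : Int), Dom_solution_to_routes solution depot → Spec_solution_to_routes solution depot (solution_to_routes solution depot)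

-- ===== LEMMAS AND PROOFS =====

theorem modifyHead_fun_id {α : Type} (l : List α) :
    l.modifyHead (fun t => t) = l := by cases l <;> rfl

-- A's loop continued from state (routes, depot :: run), then finished,
-- equals routes ++ B's wrapping of the runs of xs with pending run prefix.
theorem strA_loop_eq (depot : Int) (xs : List Int) :
    ∀ (routes : List (List Int)) (run : List Int),
    strA_finish depot (xs.foldl (strA_step depot) (routes, depot :: run))
    = routes ++ (((xs.splitOnP (· == depot)).modifyHead (run ++ ·)).filter (· ≠ [])).map
        (fun g => depot :: g ++ [depot]) := by
  induction xs with
  | nil =>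
    intro routes run
    simp only [List.foldl_nil, List.splitOnP_nil, List.modifyHead, List.append_nil,
      strA_finish]
    cases run with
    | nil => simp
    | cons a t => simp [List.length_cons]
  | cons x xs ih =>
    intro routes run
    rw [List.foldl_cons, List.splitOnP_cons]
    by_cases hx : x = depot
    · subst hx
      rw [if_pos (by simp)]
      have hstep : strA_step x (routes, x :: run) x =
          if (x :: run ++ [x]).length > 2 then (routes ++ [x :: run ++ [x]], [x])
          else (routes, [x]) := by
        simp [strA_step]
      cases run with
      | nil =>
        rw [hstep, if_neg (by simp)]
        have := ih routes []
        simp only [List.nil_append] at this ⊢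
        rw [show ([x] : List Int) = x :: ([] : List Int) from rfl, this,
          modifyHead_fun_id]
        cases hs : xs.splitOnP (· == x) with
        | nil => simp
        | cons g gs => simp [List.filter_cons]
      | cons a t =>
        rw [hstep, if_pos (by simp)]
        have := ih (routes ++ [x :: (a :: t) ++ [x]]) []
        simp only [List.nil_append] at this
        rw [modifyHead_fun_id] at this
        rw [show ([x] : List Int) = x :: ([] : List Int) from rfl, this]
        simp only [List.modifyHead, List.append_nil, List.filter_cons]
        rw [if_pos (by simp)]
        simp
    · have hbx : (x == depot) = false := by simp [hx]
      rw [if_neg (by simp [hbx])]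
      have hstep : strA_step depot (routes, depot :: run) x =
          (routes, depot :: (run ++ [x])) := by
        simp [strA_step, hx]
      rw [hstep, ih routes (run ++ [x]), List.modifyHead_modifyHead]
      have hfun : ((run ++ ·) ∘ (List.cons x)) = ((run ++ [x]) ++ ·) := by
        funext t; simp
      rw [hfun]

-- ===== VERDICT (by name: the statement is the Claim_ definition above) =====
theorem solution_to_routes_spec : Claim_equal_solution_to_routes := by
  intro solution depot _
  unfold Spec_solution_to_routes solution_to_routes solution_to_routes_alt
  have := strA_loop_eq depot solution [] []
  simp only [List.nil_append] at this
  rw [show ([depot] : List Int) = depot :: ([] : List Int) from rfl, this,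
    modifyHead_fun_id]
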